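-- pv_equiv track=rewrite | github.com/Tawana2000/Python | Python Intermediate Challenges/blum-integer.py | is_blum_integer
-- ===== SOURCE A (Python) =====
-- def is_blum_integer(n):
--
--     f, i = [], 2
--
--     while i * i <= n:
--         if n % i == 0:
--             f.append(i)
--             n //= i
--
--         else:
--             i += 1
--
--     if n > 1:
--         f.append(n)
--
--     return len(f) == 2 and all(p % 4 == 3 for p in f)
-- ===== SOURCE B (Python) =====
-- def _least_divisor(m):
--     """Smallest d with d*d <= m dividing m, or None (m prime or too small)."""
--     d = 2
--     while d * d <= m:
--         if m % d == 0:
--             return d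
--         d += 1
--     return None
--
-- def is_blum_integer(n):
--     if n <= 1:
--         return False
--     p = _least_divisor(n)
--     if p is None:
--         return False          # n is prime: only one prime factor
--     q = n // p
--     if _least_divisor(q) is not None:
--         return False          # cofactor composite: more than two prime factors
--     return p % 4 == 3 and q % 4 == 3
-- ===== Notes on version B (the rewrite author's own statement) =====
-- stated objective: alternative
-- what changed: B finds only the smallest divisor p and then trial-division-tests the primality of the cofactor q = n//p, instead of building the complete prime-factor list by repeated division and counting its length.
import Mathlib
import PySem

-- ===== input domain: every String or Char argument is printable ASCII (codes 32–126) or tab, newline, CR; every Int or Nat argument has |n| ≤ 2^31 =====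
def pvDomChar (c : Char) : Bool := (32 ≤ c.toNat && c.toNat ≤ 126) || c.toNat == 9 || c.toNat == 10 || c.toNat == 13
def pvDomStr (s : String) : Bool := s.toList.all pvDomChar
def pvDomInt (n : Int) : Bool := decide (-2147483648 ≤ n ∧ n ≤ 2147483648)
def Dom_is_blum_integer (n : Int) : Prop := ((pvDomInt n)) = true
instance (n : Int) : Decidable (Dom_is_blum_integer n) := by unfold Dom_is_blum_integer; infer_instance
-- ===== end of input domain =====

-- B replaces A's full factor-list construction by a smallest-divisor search plus a
-- primality test of the cofactor (objective: alternative decomposition, similar cost).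

-- shared trivial proof term, cited by name in both ports (termination bookkeeping only)
theorem two_le_two : (2 : Int) ≤ 2 := le_refl 2

-- ===== PORT A =====
-- A's while-loop as structural recursion; the proof argument `hi` (trivially true at the
-- top-level call, where i = 2) only justifies termination and does not alter the
-- computation.  `f.append(i)` followed by the rest of the loop is rendered as `i :: rest`;
-- the trailing `if n > 1: f.append(n)` is the base case.  All divisors are ≥ 2 > 0, so
-- Lean's Int `%` / `/` (emod/ediv) coincide with Python's `%` / `//` exactly here.
theorem pvDecStep (i n : Int) (hi : 2 ≤ i) (h : i * i ≤ n) :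
    (n - (i + 1)).toNat < (n - i).toNat := by
  have h0 : (0 : Int) < i := lt_of_lt_of_le zero_lt_two hi
  have h1 : i * 1 < i * i := mul_lt_mul_of_pos_left (lt_of_lt_of_le one_lt_two hi) h0
  have h2 : i < n := lt_of_lt_of_le (by rwa [mul_one] at h1) h
  exact (Int.toNat_lt_toNat (sub_pos.mpr h2)).mpr (sub_lt_sub_left (lt_add_one i) n)

theorem pvDecDiv (i n : Int) (hi : 2 ≤ i) (h : i * i ≤ n) :
    2 * (n / i).toNat + ((n / i) - i).toNat < 2 * n.toNat + (n - i).toNat := by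
  have h0 : (0 : Int) < i := lt_of_lt_of_le zero_lt_two hi
  have h1 : (4 : Int) ≤ i * i :=
    le_trans (by norm_num : (4:Int) ≤ 2 * 2) (mul_le_mul hi hi zero_le_two (le_of_lt h0))
  have h6 : (4 : Int) ≤ n := le_trans h1 h
  have h2 : 0 ≤ n / i := Int.ediv_nonneg (le_trans (by norm_num : (0:Int) ≤ 4) h6) (le_of_lt h0)
  have h3 : i * (n / i) ≤ n := by
    have e1 := Int.emod_nonneg n (ne_of_gt h0)
    have e2 := Int.ediv_add_emod n i
    exact le_trans (le_add_of_nonneg_right e1) (le_of_eq e2)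
  have h5 : 2 * (n / i) ≤ n := le_trans (mul_le_mul_of_nonneg_right hi h2) h3
  have hsZ : ((n / i).toNat : Int) = n / i := Int.toNat_of_nonneg h2
  have htZ : (n.toNat : Int) = n := Int.toNat_of_nonneg (le_trans (by norm_num : (0:Int) ≤ 4) h6)
  have hB : ((n / i) - i).toNat ≤ (n / i).toNat := Int.toNat_le_toNat (sub_le_self _ (le_of_lt h0))
  have h2s : 2 * (n / i).toNat ≤ n.toNat := by
    have hc : ((2 * (n / i).toNat : ℕ) : ℤ) ≤ ((n.toNat : ℕ) : ℤ) := by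
      push_cast
      rw [hsZ, htZ]
      exact h5
    exact_mod_cast hc
  have hC : 4 ≤ n.toNat := by
    have hc : ((4 : ℕ) : ℤ) ≤ ((n.toNat : ℕ) : ℤ) := by rw [htZ]; exact_mod_cast h6
    exact_mod_cast hc
  clear h hi h0 h1 h2 h3 h5 h6 hsZ htZ
  generalize ((n / i) - i).toNat = u at hB ⊢
  generalize (n / i).toNat = s at hB h2s ⊢
  generalize (n - i).toNat = v at ⊢
  generalize n.toNat = t at h2s hC ⊢
  omega

def factorLoop (i n : Int) (hi : 2 ≤ i) : List Int :=
  if h : i * i ≤ n then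
    if n % i = 0 then
      i :: factorLoop i (n / i) hi
    else
      factorLoop (i + 1) n (by omega)
  else
    if 1 < n then [n] else []
termination_by (2 * n.toNat + (n - i).toNat)
decreasing_by
  · exact pvDecDiv i n hi h
  · exact Nat.add_lt_add_left (pvDecStep i n hi h) (2 * n.toNat)

def is_blum_integer (n : Int) : Bool :=
  let f := factorLoop 2 n two_le_two
  decide (f.length = 2) && f.all (fun p => decide (p % 4 = 3))

-- ===== PORT B =====
-- `_least_divisor(m)`: smallest d ≥ 2 with d*d ≤ m dividing m, else none.
def leastDivisor (d m : Int) (hd : 2 ≤ d) : Option Int :=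
  if h : d * d ≤ m then
    if m % d = 0 then some d else leastDivisor (d + 1) m (by omega)
  else
    none
termination_by (m - d).toNat
decreasing_by
  · exact pvDecStep d m hd h

def is_blum_integer_alt (n : Int) : Bool :=
  if n ≤ 1 then false
  else
    match leastDivisor 2 n two_le_two with
    | none => false
    | some p =>
      let q := n / p
      match leastDivisor 2 q two_le_two with
      | some _ => false
      | none => decide (p % 4 = 3) && decide (q % 4 = 3)

-- ===== PRECONDITION & SPEC =====
def Spec_is_blum_integer (n : Int) (out : Bool) : Prop := out = is_blum_integer_alt n
instance (n : Int) (out : Bool) : Decidable (Spec_is_blum_integer n out) := by unfold Spec_is_blum_integer; infer_instance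

-- ===== CLAIM (what is proved, stated in full; the proofs are below) =====
def Claim_equal_is_blum_integer : Prop := ∀ (n : Int), Dom_is_blum_integer n → Spec_is_blum_integer n (is_blum_integer n)

-- ===== LEMMAS AND PROOFS =====

theorem leastDivisor_none_spec (d m : Int) (hd : 2 ≤ d) (h : leastDivisor d m hd = none) :
    ∀ j, d ≤ j → j * j ≤ m → m % j ≠ 0 := by
  fun_induction leastDivisor d m hd with
  | case1 d hd hg hdvd => simp at h
  | case2 d hd hg hdvd ih =>
    intro j hj hjj
    rcases eq_or_lt_of_le hj with rfl | hlt
    · exact hdvd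
    · exact ih h j (by omega) hjj
  | case3 d hd hg =>
    intro j hj hjj hmod
    have : d * d ≤ j * j := mul_le_mul hj hj (by omega) (by omega)
    linarith

theorem leastDivisor_some_spec (d m p : Int) (hd : 2 ≤ d) (h : leastDivisor d m hd = some p) :
    d ≤ p ∧ p * p ≤ m ∧ m % p = 0 ∧ ∀ j, d ≤ j → j < p → m % j ≠ 0 := by
  fun_induction leastDivisor d m hd with
  | case1 d hd hg hdvd =>
    injection h with h; subst h
    exact ⟨le_refl _, hg, hdvd, fun j hj hjp => by omega⟩
  | case2 d hd hg hdvd ih =>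
    obtain ⟨h1, h2, h3, h4⟩ := ih h
    refine ⟨by omega, h2, h3, fun j hj hjp => ?_⟩
    rcases eq_or_lt_of_le hj with rfl | hlt
    · exact hdvd
    · exact h4 j (by omega) hjp
  | case3 d hd hg => simp at h

theorem leastDivisor_isSome (d m : Int) (hd : 2 ≤ d) :
    ∀ j, d ≤ j → j * j ≤ m → m % j = 0 → (leastDivisor d m hd).isSome := by
  fun_induction leastDivisor d m hd with
  | case1 d hd hg hdvd => intro j _ _ _; simp
  | case2 d hd hg hdvd ih =>
    intro j hj hjj hj0
    have : j ≠ d := fun e => hdvd (e ▸ hj0)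
    exact ih j (by omega) hjj hj0
  | case3 d hd hg =>
    intro j hj hjj hj0
    exfalso
    have : d * d ≤ j * j := mul_le_mul hj hj (by omega) (by omega)
    linarith

theorem factorLoop_of_none (i n : Int) (hi : 2 ≤ i) (h : leastDivisor i n hi = none) :
    factorLoop i n hi = if 1 < n then [n] else [] := by
  fun_induction factorLoop i n hi with
  | case1 i n hi hg hdvd ih =>
    rw [leastDivisor, dif_pos hg, if_pos hdvd] at h
    simp at h
  | case2 i n hi hg hdvd ih =>
    rw [leastDivisor, dif_pos hg, if_neg hdvd] at h
    exact ih h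
  | case3 i n hi hg hlt => rw [if_pos hlt]
  | case4 i n hi hg hnlt => rw [if_neg hnlt]

theorem factorLoop_of_some (i n p : Int) (hi : 2 ≤ i) (hp : 2 ≤ p)
    (h : leastDivisor i n hi = some p) :
    factorLoop i n hi = p :: factorLoop p (n / p) hp := by
  fun_induction factorLoop i n hi with
  | case1 i n hi hg hdvd ih =>
    rw [leastDivisor, dif_pos hg, if_pos hdvd] at h
    injection h with h; subst h
    rfl
  | case2 i n hi hg hdvd ih =>
    rw [leastDivisor, dif_pos hg, if_neg hdvd] at h
    exact ih h
  | case3 i n hi hg hlt =>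
    rw [leastDivisor, dif_neg hg] at h
    simp at h
  | case4 i n hi hg hnlt =>
    rw [leastDivisor, dif_neg hg] at h
    simp at h

theorem factorLoop_ne_nil (i n : Int) (hi : 2 ≤ i) (hn : 1 < n) : factorLoop i n hi ≠ [] := by
  fun_induction factorLoop i n hi with
  | case1 i n hi hg hdvd ih => simp
  | case2 i n hi hg hdvd ih => exact ih hn
  | case3 i n hi hg hlt => simp
  | case4 i n hi hg hnlt => omega

-- ===== VERDICT (by name: the statement is the Claim_ definition above) =====
theorem is_blum_integer_spec : Claim_equal_is_blum_integer := by
  intro n _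
  unfold Spec_is_blum_integer is_blum_integer is_blum_integer_alt
  by_cases hn1 : n ≤ 1
  · have hnone : leastDivisor 2 n two_le_two = none := by
      rw [leastDivisor]; exact dif_neg (by omega)
    rw [factorLoop_of_none 2 n two_le_two hnone, if_neg (by omega : ¬ (1:Int) < n)]
    simp [hn1]
  · rw [if_neg hn1]
    have hn1 : 1 < n := by omega
    cases hm : leastDivisor 2 n two_le_two with
    | none =>
      rw [factorLoop_of_none 2 n two_le_two hm, if_pos (by omega : (1:Int) < n)]
      simp
    | some p =>
      obtain ⟨hp2, hpp, hpdvd, hmin⟩ := leastDivisor_some_spec 2 n p two_le_two hm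
      have hppos : 0 < p := by omega
      have hqp : p ≤ n / p := (Int.le_ediv_iff_mul_le hppos).mpr hpp
      have hq1 : 1 < n / p := by omega
      have hpn : p ∣ n := Int.dvd_of_emod_eq_zero hpdvd
      have hn_eq : n / p * p = n := Int.ediv_mul_cancel hpn
      rw [factorLoop_of_some 2 n p two_le_two (by omega) hm]
      cases hq : leastDivisor 2 (n / p) two_le_two with
      | none =>
        have hq_none_p : leastDivisor p (n / p) (by omega) = none := by
          cases hcase : leastDivisor p (n / p) (by omega : (2:Int) ≤ p) with
          | none => rfl
          | some d =>
            obtain ⟨hd1, hd2, hd3, _⟩ := leastDivisor_some_spec p (n / p) d (by omega) hcase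
            exact absurd hd3 (leastDivisor_none_spec 2 (n / p) two_le_two hq d (by omega) hd2)
        rw [factorLoop_of_none p (n / p) (by omega) hq_none_p, if_pos hq1]
        simp only [hq]
        simp
      | some d =>
        obtain ⟨hd1, hdd, hddvd, _⟩ := leastDivisor_some_spec 2 (n / p) d two_le_two hq
        have hpd : p ≤ d := by
          by_contra hcon
          have hlt : d < p := by omega
          have hdvd_n : n % d = 0 := by
            have h1 : d ∣ (n / p) := Int.dvd_of_emod_eq_zero hddvd
            have h2 : (n / p) ∣ n := ⟨p, hn_eq.symm⟩
            exact Int.emod_eq_zero_of_dvd (h1.trans h2)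
          have hq_le_n : n / p ≤ n := by
            have h1 : n / p * 1 ≤ n / p * p := mul_le_mul_of_nonneg_left (by omega) (by omega)
            rw [mul_one, hn_eq] at h1
            exact h1
          exact hmin d (by omega) hlt hdvd_n
        have hsome := leastDivisor_isSome p (n / p) (by omega) d hpd hdd hddvd
        obtain ⟨d', hd'⟩ := Option.isSome_iff_exists.mp hsome
        obtain ⟨hd'1, hd'2, hd'3, _⟩ := leastDivisor_some_spec p (n / p) d' (by omega) hd'
        have hd'2le : 2 ≤ d' := by omega
        rw [factorLoop_of_some p (n / p) d' (by omega) hd'2le hd']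
        have hq'1 : 1 < (n / p) / d' := by
          have : d' ≤ (n / p) / d' := (Int.le_ediv_iff_mul_le (by omega : 0 < d')).mpr hd'2
          omega
        cases hrest : factorLoop d' ((n / p) / d') hd'2le with
        | nil => exact absurd hrest (factorLoop_ne_nil d' ((n / p) / d') hd'2le hq'1)
        | cons a t =>
          simp only [hq]
          simp only [List.length_cons]
          have hlen : ¬ (t.length + 1 + 1 + 1 = 2) := by omega
          simp [hlen]
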